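-- pv_equiv track=rewrite | github.com/j-jewett/minesweeper | minesweeper.py | publicConversion
-- ===== SOURCE A (Python) =====
-- from string import ascii_lowercase as alc
--
-- def publicConversion(entry):
--     temp_row_coord = entry[0].lower()
--     temp_col_coord = entry[1]
--     row_coord = 0
--     col_coord = 0
--     for i in range(0, len(alc)):
--         if temp_row_coord == alc[i]:
--             row_coord = i + 1
--     for i in range(0, len(alc)):
--         if temp_col_coord == alc[i]:
--             col_coord = i + 1
--     return row_coord, col_coord
-- ===== SOURCE B (Python) =====
-- def publicConversion(entry):
--     r = entry[0].lower()
--     c = entry[1]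
--     row_coord = ord(r) - 96 if len(r) == 1 and 'a' <= r <= 'z' else 0
--     col_coord = ord(c) - 96 if len(c) == 1 and 'a' <= c <= 'z' else 0
--     return row_coord, col_coord
-- ===== Notes on version B (the rewrite author's own statement) =====
-- stated objective: simpler
-- what changed: B replaces A's two 26-iteration scans over the alphabet with closed-form ordinal arithmetic (ord(ch) - 96 guarded by a single-char letter-range check).
-- outside the precondition, e.g. on publicConversion(['a']): A raises IndexError, B raises IndexError
import Mathlib
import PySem

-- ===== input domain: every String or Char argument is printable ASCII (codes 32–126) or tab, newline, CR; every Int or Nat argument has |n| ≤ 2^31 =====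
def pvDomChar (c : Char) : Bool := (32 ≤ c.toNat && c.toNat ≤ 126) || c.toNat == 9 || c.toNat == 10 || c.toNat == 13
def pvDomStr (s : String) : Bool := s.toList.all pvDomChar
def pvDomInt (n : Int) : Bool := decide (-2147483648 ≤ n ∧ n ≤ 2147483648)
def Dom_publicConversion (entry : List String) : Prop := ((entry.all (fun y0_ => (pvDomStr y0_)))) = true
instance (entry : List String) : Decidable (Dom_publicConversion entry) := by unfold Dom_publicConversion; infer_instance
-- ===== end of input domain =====

-- B replaces A's two 26-iteration alphabet scans with direct ordinal arithmetic (objective: simpler; return-value equivalence).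
-- ===== PORT A =====
def pvAlc : List Char := "abcdefghijklmnopqrstuvwxyz".toList

def publicConversion (entry : List String) : Int × Int :=
  match PySem.List.pyGet? entry 0, PySem.List.pyGet? entry 1 with
  | some e0, some e1 =>
    let temp_row_coord := (PySem.Str.lower e0).toList
    let temp_col_coord := e1.toList
    let row_coord : Int := (PySem.List.pyRange 0 26 1).foldl
      (fun acc i => if temp_row_coord = [PySem.List.pyGetD pvAlc i 'a'] then i + 1 else acc) 0
    let col_coord : Int := (PySem.List.pyRange 0 26 1).foldl
      (fun acc i => if temp_col_coord = [PySem.List.pyGetD pvAlc i 'a'] then i + 1 else acc) 0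
    (row_coord, col_coord)
  | _, _ => (0, 0)   -- unreachable under Pre_ (IndexError in Python)

-- ===== PORT B =====
def pvCoord (s : List Char) : Int :=
  match s with
  | [ch] => if 'a' ≤ ch ∧ ch ≤ 'z' then (ch.toNat : Int) - 96 else 0
  | _ => 0

def publicConversion_alt (entry : List String) : Int × Int :=
  (((PySem.List.pyGet? entry 0).bind fun e0 =>
      (PySem.List.pyGet? entry 1).map fun e1 =>
        (pvCoord (PySem.Str.lower e0).toList, pvCoord e1.toList)).getD
    (0, 0))   -- default is unreachable under Pre_ (IndexError in Python)

-- ===== PRECONDITION & SPEC =====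
-- Pre_ excludes entries with fewer than two elements, on which Python's entry[0]/entry[1] raises IndexError.
def Pre_publicConversion (entry : List String) : Prop := 2 ≤ entry.length
instance (entry : List String) : Decidable (Pre_publicConversion entry) := by unfold Pre_publicConversion; infer_instance
def pvWitness_publicConversion : List String := ["C", "d"]
def Spec_publicConversion (entry : List String) (out : Int × Int) : Prop := out = publicConversion_alt entry
instance (entry : List String) (out : Int × Int) : Decidable (Spec_publicConversion entry out) := by unfold Spec_publicConversion; infer_instance

-- ===== CLAIM (what is proved, stated in full; the proofs are below) =====
def Claim_equal_publicConversion : Prop := ∀ (entry : List String), Dom_publicConversion entry → Pre_publicConversion entry → Spec_publicConversion entry (publicConversion entry)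

-- ===== LEMMAS AND PROOFS =====
lemma pvAlcGet_0 : PySem.List.pyGetD pvAlc 0 'a' = 'a' := by decide
lemma pvAlcGet_1 : PySem.List.pyGetD pvAlc 1 'a' = 'b' := by decide
lemma pvAlcGet_2 : PySem.List.pyGetD pvAlc 2 'a' = 'c' := by decide
lemma pvAlcGet_3 : PySem.List.pyGetD pvAlc 3 'a' = 'd' := by decide
lemma pvAlcGet_4 : PySem.List.pyGetD pvAlc 4 'a' = 'e' := by decide
lemma pvAlcGet_5 : PySem.List.pyGetD pvAlc 5 'a' = 'f' := by decide
lemma pvAlcGet_6 : PySem.List.pyGetD pvAlc 6 'a' = 'g' := by decide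
lemma pvAlcGet_7 : PySem.List.pyGetD pvAlc 7 'a' = 'h' := by decide
lemma pvAlcGet_8 : PySem.List.pyGetD pvAlc 8 'a' = 'i' := by decide
lemma pvAlcGet_9 : PySem.List.pyGetD pvAlc 9 'a' = 'j' := by decide
lemma pvAlcGet_10 : PySem.List.pyGetD pvAlc 10 'a' = 'k' := by decide
lemma pvAlcGet_11 : PySem.List.pyGetD pvAlc 11 'a' = 'l' := by decide
lemma pvAlcGet_12 : PySem.List.pyGetD pvAlc 12 'a' = 'm' := by decide
lemma pvAlcGet_13 : PySem.List.pyGetD pvAlc 13 'a' = 'n' := by decide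
lemma pvAlcGet_14 : PySem.List.pyGetD pvAlc 14 'a' = 'o' := by decide
lemma pvAlcGet_15 : PySem.List.pyGetD pvAlc 15 'a' = 'p' := by decide
lemma pvAlcGet_16 : PySem.List.pyGetD pvAlc 16 'a' = 'q' := by decide
lemma pvAlcGet_17 : PySem.List.pyGetD pvAlc 17 'a' = 'r' := by decide
lemma pvAlcGet_18 : PySem.List.pyGetD pvAlc 18 'a' = 's' := by decide
lemma pvAlcGet_19 : PySem.List.pyGetD pvAlc 19 'a' = 't' := by decide
lemma pvAlcGet_20 : PySem.List.pyGetD pvAlc 20 'a' = 'u' := by decide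
lemma pvAlcGet_21 : PySem.List.pyGetD pvAlc 21 'a' = 'v' := by decide
lemma pvAlcGet_22 : PySem.List.pyGetD pvAlc 22 'a' = 'w' := by decide
lemma pvAlcGet_23 : PySem.List.pyGetD pvAlc 23 'a' = 'x' := by decide
lemma pvAlcGet_24 : PySem.List.pyGetD pvAlc 24 'a' = 'y' := by decide
lemma pvAlcGet_25 : PySem.List.pyGetD pvAlc 25 'a' = 'z' := by decide

lemma pvRange26 : PySem.List.pyRange 0 26 1 =
    [0,1,2,3,4,5,6,7,8,9,10,11,12,13,14,15,16,17,18,19,20,21,22,23,24,25] := by decide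

lemma pvLeToNat {c d : Char} (h : c ≤ d) : c.toNat ≤ d.toNat :=
  UInt32.le_iff_toNat_le.mp (Char.le_def.mp h)

lemma pvCharEqOfToNat (c d : Char) (h : c.toNat = d.toNat) : c = d := by
  apply Char.ext; exact UInt32.toNat_inj.mp h

set_option maxRecDepth 8192 in
lemma pvFold_eq_coord (l : List Char) :
    (PySem.List.pyRange 0 26 1).foldl
      (fun acc i => if l = [PySem.List.pyGetD pvAlc i 'a'] then i + 1 else acc) (0 : Int)
      = pvCoord l := by
  rw [pvRange26]
  simp only [List.foldl]
  simp only [pvAlcGet_0, pvAlcGet_1, pvAlcGet_2, pvAlcGet_3, pvAlcGet_4, pvAlcGet_5, pvAlcGet_6, pvAlcGet_7, pvAlcGet_8, pvAlcGet_9, pvAlcGet_10, pvAlcGet_11, pvAlcGet_12, pvAlcGet_13, pvAlcGet_14, pvAlcGet_15, pvAlcGet_16, pvAlcGet_17, pvAlcGet_18, pvAlcGet_19, pvAlcGet_20, pvAlcGet_21, pvAlcGet_22, pvAlcGet_23, pvAlcGet_24, pvAlcGet_25]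
  match l with
  | [] => decide
  | c :: d :: t =>
    have h0 : pvCoord (c :: d :: t) = 0 := rfl
    rw [h0]; simp
  | [c] =>
    simp only [List.cons.injEq, and_true]
    by_cases hC_z : c = 'z'
    · subst hC_z; decide
    simp only [hC_z, if_false]
    by_cases hC_y : c = 'y'
    · subst hC_y; decide
    simp only [hC_y, if_false]
    by_cases hC_x : c = 'x'
    · subst hC_x; decide
    simp only [hC_x, if_false]
    by_cases hC_w : c = 'w'
    · subst hC_w; decide
    simp only [hC_w, if_false]
    by_cases hC_v : c = 'v'
    · subst hC_v; decide
    simp only [hC_v, if_false]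
    by_cases hC_u : c = 'u'
    · subst hC_u; decide
    simp only [hC_u, if_false]
    by_cases hC_t : c = 't'
    · subst hC_t; decide
    simp only [hC_t, if_false]
    by_cases hC_s : c = 's'
    · subst hC_s; decide
    simp only [hC_s, if_false]
    by_cases hC_r : c = 'r'
    · subst hC_r; decide
    simp only [hC_r, if_false]
    by_cases hC_q : c = 'q'
    · subst hC_q; decide
    simp only [hC_q, if_false]
    by_cases hC_p : c = 'p'
    · subst hC_p; decide
    simp only [hC_p, if_false]
    by_cases hC_o : c = 'o'
    · subst hC_o; decide
    simp only [hC_o, if_false]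
    by_cases hC_n : c = 'n'
    · subst hC_n; decide
    simp only [hC_n, if_false]
    by_cases hC_m : c = 'm'
    · subst hC_m; decide
    simp only [hC_m, if_false]
    by_cases hC_l : c = 'l'
    · subst hC_l; decide
    simp only [hC_l, if_false]
    by_cases hC_k : c = 'k'
    · subst hC_k; decide
    simp only [hC_k, if_false]
    by_cases hC_j : c = 'j'
    · subst hC_j; decide
    simp only [hC_j, if_false]
    by_cases hC_i : c = 'i'
    · subst hC_i; decide
    simp only [hC_i, if_false]
    by_cases hC_h : c = 'h'
    · subst hC_h; decide
    simp only [hC_h, if_false]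
    by_cases hC_g : c = 'g'
    · subst hC_g; decide
    simp only [hC_g, if_false]
    by_cases hC_f : c = 'f'
    · subst hC_f; decide
    simp only [hC_f, if_false]
    by_cases hC_e : c = 'e'
    · subst hC_e; decide
    simp only [hC_e, if_false]
    by_cases hC_d : c = 'd'
    · subst hC_d; decide
    simp only [hC_d, if_false]
    by_cases hC_c : c = 'c'
    · subst hC_c; decide
    simp only [hC_c, if_false]
    by_cases hC_b : c = 'b'
    · subst hC_b; decide
    simp only [hC_b, if_false]
    by_cases hC_a : c = 'a'
    · subst hC_a; decide
    simp only [hC_a, if_false]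
    show 0 = if 'a' ≤ c ∧ c ≤ 'z' then ((c.toNat : Int)) - 96 else 0
    split_ifs with hin
    · exfalso
      have t1 : 97 ≤ c.toNat := le_trans (le_of_eq (by decide)) (pvLeToNat hin.1)
      have t2 : c.toNat ≤ 122 := le_trans (pvLeToNat hin.2) (le_of_eq (by decide))
      rcases (by omega :
          c.toNat = 97 ∨ c.toNat = 98 ∨ c.toNat = 99 ∨ c.toNat = 100 ∨ c.toNat = 101 ∨ c.toNat = 102 ∨ c.toNat = 103 ∨ c.toNat = 104 ∨ c.toNat = 105 ∨ c.toNat = 106 ∨ c.toNat = 107 ∨ c.toNat = 108 ∨ c.toNat = 109 ∨ c.toNat = 110 ∨ c.toNat = 111 ∨ c.toNat = 112 ∨ c.toNat = 113 ∨ c.toNat = 114 ∨ c.toNat = 115 ∨ c.toNat = 116 ∨ c.toNat = 117 ∨ c.toNat = 118 ∨ c.toNat = 119 ∨ c.toNat = 120 ∨ c.toNat = 121 ∨ c.toNat = 122) with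
        hv0 | hv1 | hv2 | hv3 | hv4 | hv5 | hv6 | hv7 | hv8 | hv9 | hv10 | hv11 | hv12 | hv13 | hv14 | hv15 | hv16 | hv17 | hv18 | hv19 | hv20 | hv21 | hv22 | hv23 | hv24 | hv25
      · exact hC_a (pvCharEqOfToNat c 'a' (hv0.trans (by decide)))
      · exact hC_b (pvCharEqOfToNat c 'b' (hv1.trans (by decide)))
      · exact hC_c (pvCharEqOfToNat c 'c' (hv2.trans (by decide)))
      · exact hC_d (pvCharEqOfToNat c 'd' (hv3.trans (by decide)))
      · exact hC_e (pvCharEqOfToNat c 'e' (hv4.trans (by decide)))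
      · exact hC_f (pvCharEqOfToNat c 'f' (hv5.trans (by decide)))
      · exact hC_g (pvCharEqOfToNat c 'g' (hv6.trans (by decide)))
      · exact hC_h (pvCharEqOfToNat c 'h' (hv7.trans (by decide)))
      · exact hC_i (pvCharEqOfToNat c 'i' (hv8.trans (by decide)))
      · exact hC_j (pvCharEqOfToNat c 'j' (hv9.trans (by decide)))
      · exact hC_k (pvCharEqOfToNat c 'k' (hv10.trans (by decide)))
      · exact hC_l (pvCharEqOfToNat c 'l' (hv11.trans (by decide)))
      · exact hC_m (pvCharEqOfToNat c 'm' (hv12.trans (by decide)))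
      · exact hC_n (pvCharEqOfToNat c 'n' (hv13.trans (by decide)))
      · exact hC_o (pvCharEqOfToNat c 'o' (hv14.trans (by decide)))
      · exact hC_p (pvCharEqOfToNat c 'p' (hv15.trans (by decide)))
      · exact hC_q (pvCharEqOfToNat c 'q' (hv16.trans (by decide)))
      · exact hC_r (pvCharEqOfToNat c 'r' (hv17.trans (by decide)))
      · exact hC_s (pvCharEqOfToNat c 's' (hv18.trans (by decide)))
      · exact hC_t (pvCharEqOfToNat c 't' (hv19.trans (by decide)))
      · exact hC_u (pvCharEqOfToNat c 'u' (hv20.trans (by decide)))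
      · exact hC_v (pvCharEqOfToNat c 'v' (hv21.trans (by decide)))
      · exact hC_w (pvCharEqOfToNat c 'w' (hv22.trans (by decide)))
      · exact hC_x (pvCharEqOfToNat c 'x' (hv23.trans (by decide)))
      · exact hC_y (pvCharEqOfToNat c 'y' (hv24.trans (by decide)))
      · exact hC_z (pvCharEqOfToNat c 'z' (hv25.trans (by decide)))
    · rfl

-- ===== VERDICT (by name: the statement is the Claim_ definition above) =====
theorem publicConversion_spec : Claim_equal_publicConversion := by
  intro entry _ hpre
  unfold Pre_publicConversion at hpre
  rcases entry with _ | ⟨a, _ | ⟨b, t⟩⟩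
  · simp at hpre
  · simp at hpre
  unfold Spec_publicConversion publicConversion publicConversion_alt
  have hx : PySem.List.pyGet? (a :: b :: t) 0 = some a := by
    simp [PySem.List.pyGet?, PySem.List.pyIdx?]
    rw [if_pos (by omega)]
    simp
  have hy : PySem.List.pyGet? (a :: b :: t) 1 = some b := by
    simp [PySem.List.pyGet?, PySem.List.pyIdx?]
  rw [hx, hy]
  dsimp only [Option.bind, Option.map, Option.getD]
  simp only [pvFold_eq_coord]
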